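-- pv_equiv track=rewrite | github.com/backtracker/music_tag_tool | main.py | clean_artists
-- ===== SOURCE A (Python) =====
-- def clean_artists(text, target_artists):
--     # 预处理：生成标准化键到原始名称的映射
--     original_map = {}
--     for artist in target_artists:
--         # 移除空格并转为小写作为匹配键
--         key = artist.replace(" ", "").lower()
--         original_map[key] = artist  # 记录原始名称
--
--     words = text.split()
--     n = len(words)
--     remove_ranges = []
--     matched_artists = []  # 存储匹配到的原始艺术家名称
--
--     i = 0
--     while i < n:
--         max_length = 0
--         found_key = None
--
--         # 从当前位置i开始，尝试匹配最长可能的连续单词组合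
--         for j in range(i + 1, min(i + 5, n + 1)):  # 假设艺术家名称最多4个单词
--             candidate = " ".join(words[i:j])
--             normalized = candidate.replace(" ", "").lower()
--
--             # 如果标准化后的候选值在目标列表中
--             if normalized in original_map:
--                 # 优先选择更长的匹配（例如防止"南拳妈妈"误匹配"南拳妈妈&Lara"的前半部分）
--                 if (j - i) > max_length:
--                     max_length = j - i
--                     found_key = normalized
--
--         if found_key:
--             # 记录需要删除的范围和匹配到的原始名称
--             remove_ranges.append((i, i + max_length))
--             matched_artists.append(original_map[found_key])
--             i += max_length  # 跳过已处理的部分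
--         else:
--             i += 1
--
--     # 构造清理后的文本
--     result = []
--     last_end = 0
--     for start, end in remove_ranges:
--         result.extend(words[last_end:start])
--         last_end = end
--     result.extend(words[last_end:])
--
--     cleaned_text = " ".join(result)
--     return matched_artists, cleaned_text  # 返回匹配列表和清理后的文本
-- ===== SOURCE B (Python) =====
-- def clean_artists(text, target_artists):
--     # Staged approach: normalize each word once, build a prefix set (a flattened
--     # trie) over the normalized artist keys for early pruning, precompute a
--     # per-position longest-match table, then jump-walk the table.
--     original_map = {}
--     for artist in target_artists:
--         original_map[artist.replace(" ", "").lower()] = artist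
--
--     # every character-level prefix of every key: membership tells whether a
--     # growing candidate can still extend to a full key
--     prefixes = set(k[:j] for k in original_map for j in range(len(k) + 1))
--
--     words = text.split()
--     norm = [w.replace(" ", "").lower() for w in words]
--     n = len(words)
--
--     # stage 1: for each start position, the longest match (length, key) or None,
--     # built incrementally and abandoned as soon as no key can start this way
--     table = []
--     for i in range(n):
--         acc = ""
--         hit = None
--         for L in range(1, min(4, n - i) + 1):
--             acc += norm[i + L - 1]
--             if acc not in prefixes:
--                 break
--             if acc in original_map:
--                 hit = (L, acc)
--         table.append(hit)
--
--     # stage 2: jump-walk the table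
--     matched_artists = []
--     kept = []
--     i = 0
--     while i < n:
--         hit = table[i]
--         if hit is None:
--             kept.append(words[i])
--             i += 1
--         else:
--             matched_artists.append(original_map[hit[1]])
--             i += hit[0]
--     return matched_artists, " ".join(kept)
-- ===== Notes on version B (the rewrite author's own statement) =====
-- stated objective: alternative
-- what changed: B replaces A's per-window join/replace normalization, greedy max-tracking rescan and remove_ranges reconstruction pass by staged passes: each word is normalized once, a character-prefix set (a flattened trie) over the artist keys lets a growing candidate be abandoned as soon as no key can start with it, a per-position longest-match table is precomputed, and a final jump-walk over the table emits matches and surviving words.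
import Mathlib
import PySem

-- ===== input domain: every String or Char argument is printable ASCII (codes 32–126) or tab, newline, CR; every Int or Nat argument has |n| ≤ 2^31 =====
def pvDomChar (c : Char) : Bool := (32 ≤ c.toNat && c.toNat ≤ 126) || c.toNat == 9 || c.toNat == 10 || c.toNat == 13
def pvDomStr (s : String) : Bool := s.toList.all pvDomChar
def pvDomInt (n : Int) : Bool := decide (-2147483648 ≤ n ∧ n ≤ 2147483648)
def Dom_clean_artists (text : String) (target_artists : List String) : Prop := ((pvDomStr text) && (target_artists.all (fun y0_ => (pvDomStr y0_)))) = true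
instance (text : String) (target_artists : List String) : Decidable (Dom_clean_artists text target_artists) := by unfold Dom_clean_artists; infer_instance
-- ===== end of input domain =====

-- B replaces A's per-window join/replace normalization, greedy rescan and
-- remove_ranges reconstruction by staged passes: per-word normalization done
-- once, a character-prefix set (a flattened trie) over the artist keys for
-- early abandonment of candidates, a precomputed per-position match table,
-- then a jump-walk over that table (objective: alternative).

-- shared helper: x.replace(" ", "").lower() — the normalization both Pythons
-- apply to a single string (ports work on List Char, PySem's string layer)
def normW (w : List Char) : List Char :=
  PySem.Chars.lower (PySem.Chars.replace w [' '] [])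

-- shared helper: the original_map build loop (identical in both Pythons;
-- later duplicates overwrite)
def buildMap (target_artists : List String) : PySem.Dict (List Char) String :=
  target_artists.foldl (fun d a => d.insert (normW a.toList) a) PySem.Dict.empty

-- ===== PORT A =====
-- inner for-loop over j in range(i+1, min(i+5, n+1)); indices are Nats with
-- i < j ≤ n, so words[i:j] = (words.drop i).take (j-i) and range = List.range'
-- (Nat subtraction clamps the empty range exactly like Python's range)
def findA (om : PySem.Dict (List Char) String) (words : List (List Char)) (n i : Nat) :
    Nat × Option (List Char) :=
  (List.range' (i + 1) (min (i + 5) (n + 1) - (i + 1))).foldl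
    (fun st j =>
      let normalized :=
        PySem.Chars.lower (PySem.Chars.replace
          (PySem.Chars.join [' '] ((words.drop i).take (j - i))) [' '] [])
      if om.contains normalized then
        if j - i > st.1 then (j - i, some normalized) else st
      else st)
    (0, none)

-- the while loop; fuel = n bounds the ≤ n iterations (i strictly increases)
def loopA (om : PySem.Dict (List Char) String) (words : List (List Char)) (n : Nat) :
    Nat → Nat → List (Nat × Nat) × List String
  | 0, _ => ([], [])
  | fuel + 1, i =>
    if i < n then
      let st := findA om words n i
      match st.2 with
      | some k =>
          let rest := loopA om words n fuel (i + st.1)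
          ((i, i + st.1) :: rest.1, ((om.get? k).getD "") :: rest.2)
      | none => loopA om words n fuel (i + 1)
    else ([], [])

def clean_artists (text : String) (target_artists : List String) : List String × String :=
  let om := buildMap target_artists
  let words := PySem.Chars.split₀ text.toList
  let n := words.length
  let res := loopA om words n n 0
  -- reconstruction for-loop over remove_ranges with (result, last_end)
  let rec' := res.1.foldl
    (fun (st : List (List Char) × Nat) r => (st.1 ++ (words.drop st.2).take (r.1 - st.2), r.2))
    ([], 0)
  (res.2, String.ofList (PySem.Chars.join [' '] (rec'.1 ++ words.drop rec'.2)))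

-- ===== PORT B =====
-- prefixes = set(k[:j] for k in original_map for j in range(len(k)+1))
def buildPrefixes (om : PySem.Dict (List Char) String) : PySem.Set (List Char) :=
  PySem.Set.ofList (om.keys.flatMap (fun k =>
    (PySem.List.pyRange 0 ((k.length : Int) + 1) 1).map (fun j => PySem.List.slice k none (some j))))

-- stage-1 inner loop: acc += norm[i+L-1]; break when acc leaves the prefix
-- set, record (L, acc) on a full-key hit; recursion on the remaining count
def bestGo (om : PySem.Dict (List Char) String) (P : PySem.Set (List Char))
    (norm : List (List Char)) (i : Nat) :
    Nat → Nat → List Char → Option (Nat × List Char) → Option (Nat × List Char)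
  | _, 0, _, hit => hit
  | L, r + 1, acc, hit =>
      let acc' := acc ++ norm.getD (i + L - 1) []
      if PySem.Set.contains P acc' then
        bestGo om P norm i (L + 1) r acc' (if om.contains acc' then some (L, acc') else hit)
      else hit

-- stage-2 jump-walk over the table; fuel = n bounds the iterations
def loopB (om : PySem.Dict (List Char) String) (table : List (Option (Nat × List Char)))
    (words : List (List Char)) (n : Nat) :
    Nat → Nat → List String × List (List Char)
  | 0, _ => ([], [])
  | fuel + 1, i =>
    if i < n then
      match table.getD i none with
      | some hit =>
          let rest := loopB om table words n fuel (i + hit.1)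
          (((om.get? hit.2).getD "") :: rest.1, rest.2)
      | none =>
          let rest := loopB om table words n fuel (i + 1)
          (rest.1, words.getD i [] :: rest.2)
    else ([], [])

def clean_artists_alt (text : String) (target_artists : List String) : List String × String :=
  let om := buildMap target_artists
  let prefixes := buildPrefixes om
  let words := PySem.Chars.split₀ text.toList
  let norm := words.map normW
  let n := words.length
  let table := (List.range n).map (fun i => bestGo om prefixes norm i 1 (min 4 (n - i)) [] none)
  let res := loopB om table words n n 0
  (res.1, String.ofList (PySem.Chars.join [' '] res.2))

-- ===== PRECONDITION & SPEC =====
def Spec_clean_artists (text : String) (target_artists : List String) (out : List String × String) : Prop := out = clean_artists_alt text target_artists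
instance (text : String) (target_artists : List String) (out : List String × String) : Decidable (Spec_clean_artists text target_artists out) := by unfold Spec_clean_artists; infer_instance

-- ===== CLAIM (what is proved, stated in full; the proofs are below) =====
def Claim_equal_clean_artists : Prop := ∀ (text : String) (target_artists : List String), Dom_clean_artists text target_artists → Spec_clean_artists text target_artists (clean_artists text target_artists)

-- ===== LEMMAS AND PROOFS =====

-- s.replace(" ", "") with a one-char pattern is a character filter
theorem rep_go (f : Nat) : ∀ (l acc : List Char), l.length ≤ f →
    PySem.Chars.replace.go [' '] [] f l acc = acc.reverse ++ l.filter (fun c => !(c == ' ')) := by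
  induction f with
  | zero => intro l acc h; simp_all [PySem.Chars.replace.go, List.length_eq_zero_iff.mp (by omega : l.length = 0)]
  | succ f ih =>
      intro l acc h
      match l with
      | [] => simp [PySem.Chars.replace.go]
      | c :: t =>
          simp only [PySem.Chars.replace.go, List.isPrefixOf]
          by_cases hc : c = ' '
          · subst hc; simp only [List.length_cons] at h
            simp [ih t acc (by omega)]
          · simp only [List.length_cons] at h
            simp [ih t (c :: acc) (by omega), hc, Ne.symm hc]

theorem rep_space (s : List Char) :
    PySem.Chars.replace s [' '] [] = s.filter (fun c => !(c == ' ')) := by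
  simp [PySem.Chars.replace, rep_go s.length s [] le_rfl]

theorem filter_intercalate (p : Char → Bool) (hp : p ' ' = false) :
    ∀ ws : List (List Char), (List.intercalate [' '] ws).filter p = (ws.map (fun w => w.filter p)).flatten := by
  intro ws
  induction ws with
  | nil => simp [List.intercalate]
  | cons a t ih =>
      cases t with
      | nil => simp [List.intercalate]
      | cons b t' =>
          have : List.intercalate [' '] (a::b::t') = a ++ [' '] ++ List.intercalate [' '] (b::t') := by
            simp [List.intercalate, List.intersperse]
          rw [this]
          simp only [List.filter_append, ih, List.map_cons, List.flatten_cons]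
          simp [hp]

-- A's window key = concatenation of B's per-word keys
theorem normJ_eq (ws : List (List Char)) :
    PySem.Chars.lower (PySem.Chars.replace (PySem.Chars.join [' '] ws) [' '] []) =
      (ws.map normW).flatten := by
  simp only [PySem.Chars.join, rep_space,
    filter_intercalate (fun c => !(c == ' ')) (by simp) ws, PySem.Chars.lower]
  simp only [List.map_flatten, List.map_map]
  congr 1
  exact List.map_congr_left (fun a _ => by simp [normW, rep_space, PySem.Chars.lower])

-- any key of om, truncated anywhere, is in the prefix set
theorem prefix_mem (om : PySem.Dict (List Char) String) (u v : List Char)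
    (h : om.contains (u ++ v) = true) :
    PySem.Set.contains (buildPrefixes om) u = true := by
  rw [PySem.Set.contains_iff]
  unfold buildPrefixes
  rw [PySem.Set.mem_ofList, List.mem_flatMap]
  refine ⟨u ++ v, (PySem.Dict.contains_iff_mem_keys om (u ++ v)).mp h, ?_⟩
  rw [List.mem_map]
  refine ⟨(u.length : Int), ?_, ?_⟩
  · rw [PySem.List.mem_pyRange_one]
    constructor
    · exact_mod_cast Nat.zero_le _
    · have : u.length ≤ (u ++ v).length := by simp
      omega
  · rw [PySem.List.slice_to_natCast]
    exact List.take_left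

theorem prune_kills (om : PySem.Dict (List Char) String) (u v : List Char)
    (h : PySem.Set.contains (buildPrefixes om) u = false) :
    om.contains (u ++ v) = false := by
  by_contra hc
  rw [Bool.not_eq_false] at hc
  rw [prefix_mem om u v hc] at h
  simp at h

-- the pruned inner loop equals the unpruned one (proof-only helper)
def bestGo' (om : PySem.Dict (List Char) String) (norm : List (List Char)) (i : Nat) :
    Nat → Nat → List Char → Option (Nat × List Char) → Option (Nat × List Char)
  | _, 0, _, hit => hit
  | L, r + 1, acc, hit =>
      let acc' := acc ++ norm.getD (i + L - 1) []
      bestGo' om norm i (L + 1) r acc' (if om.contains acc' then some (L, acc') else hit)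

theorem bestGo'_const (om : PySem.Dict (List Char) String) (norm : List (List Char)) (i : Nat) :
    ∀ (r L : Nat) (acc : List Char) (hit : Option (Nat × List Char)),
      (∀ v, om.contains (acc ++ v) = false) →
      bestGo' om norm i L r acc hit = hit := by
  intro r
  induction r with
  | zero => intro L acc hit _; rfl
  | succ r ih =>
      intro L acc hit h
      simp only [bestGo', h (norm.getD (i + L - 1) []), Bool.false_eq_true, if_false]
      exact ih (L + 1) (acc ++ norm.getD (i + L - 1) []) hit
        (fun v => by rw [List.append_assoc]; exact h _)

theorem bestGo_eq_bestGo' (om : PySem.Dict (List Char) String) (norm : List (List Char)) (i : Nat) :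
    ∀ (r L : Nat) (acc : List Char) (hit : Option (Nat × List Char)),
      bestGo om (buildPrefixes om) norm i L r acc hit = bestGo' om norm i L r acc hit := by
  intro r
  induction r with
  | zero => intro L acc hit; rfl
  | succ r ih =>
      intro L acc hit
      simp only [bestGo, bestGo']
      by_cases hp : PySem.Set.contains (buildPrefixes om) (acc ++ norm.getD (i + L - 1) []) = true
      · rw [if_pos hp, ih]
      · rw [if_neg hp]
        rw [Bool.not_eq_true] at hp
        have hc : om.contains (acc ++ norm.getD (i + L - 1) []) = false := by
          have := prune_kills om (acc ++ norm.getD (i + L - 1) []) [] (by simpa using hp)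
          simpa using this
        simp only [hc, Bool.false_eq_true, if_false]
        exact (bestGo'_const om norm i r (L + 1) (acc ++ norm.getD (i + L - 1) []) hit
          (fun v => prune_kills om _ v hp)).symm

-- findA returns a positive length whenever it returns a key
theorem findA_pos (om : PySem.Dict (List Char) String) (words : List (List Char)) (n i : Nat) :
    ∀ k, (findA om words n i).2 = some k → 1 ≤ (findA om words n i).1 := by
  unfold findA
  have H : ∀ (l : List Nat) (st : Nat × Option (List Char)),
      (∀ j ∈ l, i + 1 ≤ j) → (∀ k, st.2 = some k → 1 ≤ st.1) →
      ∀ k, (l.foldl (fun st j =>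
        let normalized := PySem.Chars.lower (PySem.Chars.replace
          (PySem.Chars.join [' '] ((words.drop i).take (j - i))) [' '] [])
        if om.contains normalized then
          if j - i > st.1 then (j - i, some normalized) else st
        else st) st).2 = some k →
        1 ≤ (l.foldl (fun st j =>
        let normalized := PySem.Chars.lower (PySem.Chars.replace
          (PySem.Chars.join [' '] ((words.drop i).take (j - i))) [' '] [])
        if om.contains normalized then
          if j - i > st.1 then (j - i, some normalized) else st
        else st) st).1 := by
    intro l
    induction l with
    | nil => intro st _ hst; exact hst
    | cons j t ih =>
        intro st hmem hst
        simp only [List.foldl_cons]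
        apply ih _ (fun x hx => hmem x (List.mem_cons_of_mem _ hx))
        intro k hk
        have hj := hmem j (List.mem_cons_self)
        split_ifs at hk ⊢ with h1 h2
        · omega
        · exact hst k hk
        · exact hst k hk
  intro k
  apply H _ _ (fun j hj => by
    rw [List.mem_range'_1] at hj; omega) (by rintro k ⟨⟩)

-- B's acc chain in window terms: K i L = the key of the L-word window at i
def K (words : List (List Char)) (i L : Nat) : List Char :=
  (((words.drop i).take L).map normW).flatten

theorem K_succ (words : List (List Char)) (i L : Nat) (h : i + L < words.length) :
    K words i (L + 1) = K words i L ++ normW (words.getD (i + L) []) := by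
  unfold K
  rw [List.take_add_one]
  have : (words.drop i)[L]? = some (words.getD (i + L) []) := by
    rw [List.getElem?_drop]
    rw [List.getD_eq_getElem?_getD, List.getElem?_eq_getElem h]
    simp
  rw [this]
  simp

theorem norm_getD (words : List (List Char)) (j : Nat) (h : j < words.length) :
    (words.map normW).getD j [] = normW (words.getD j []) := by
  rw [List.getD_eq_getElem?_getD, List.getD_eq_getElem?_getD, List.getElem?_map,
    List.getElem?_eq_getElem h]
  simp

-- proof-only spec: the topmost hit among window lengths [L, L+r)
def G (om : PySem.Dict (List Char) String) (words : List (List Char)) (i : Nat) :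
    Nat → Nat → Option (Nat × List Char)
  | _, 0 => none
  | L, r + 1 =>
      if om.contains (K words i (L + r)) then some (L + r, K words i (L + r))
      else G om words i L r

theorem G_bound (om : PySem.Dict (List Char) String) (words : List (List Char)) (i : Nat) :
    ∀ (r L L' : Nat) (k : List Char), G om words i L r = some (L', k) → L ≤ L' ∧ L' < L + r := by
  intro r
  induction r with
  | zero => intro L L' k h; simp [G] at h
  | succ r ih =>
      intro L L' k h
      simp only [G] at h
      split_ifs at h with hc
      · simp at h; omega
      · have := ih L L' k h; omega

theorem G_shift (om : PySem.Dict (List Char) String) (words : List (List Char)) (i : Nat) :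
    ∀ (r L : Nat), G om words i L (r + 1) =
      (match G om words i (L + 1) r with
       | some x => some x
       | none => if om.contains (K words i L) then some (L, K words i L) else none) := by
  intro r
  induction r with
  | zero => intro L; simp [G]
  | succ r ih =>
      intro L
      have h1 : G om words i L (r + 1 + 1) =
          if om.contains (K words i (L + (r + 1))) then some (L + (r + 1), K words i (L + (r + 1)))
          else G om words i L (r + 1) := rfl
      have h2 : G om words i (L + 1) (r + 1) =
          if om.contains (K words i (L + 1 + r)) then some (L + 1 + r, K words i (L + 1 + r))
          else G om words i (L + 1) r := rfl
      rw [h1, h2, ih L]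
      have e : L + 1 + r = L + (r + 1) := by omega
      rw [e]
      by_cases hc : om.contains (K words i (L + (r + 1))) = true
      · simp [hc]
      · simp only [Bool.not_eq_true] at hc
        simp [hc]

-- B's unpruned inner loop computes the topmost hit (acc is the running key)
theorem bestGo'_spec (om : PySem.Dict (List Char) String) (words : List (List Char)) (i : Nat) :
    ∀ (r L : Nat) (hit : Option (Nat × List Char)), 1 ≤ L → i + (L - 1) + r ≤ words.length →
      bestGo' om (words.map normW) i L r (K words i (L - 1)) hit =
        (match G om words i L r with
         | some x => some x
         | none => hit) := by
  intro r
  induction r with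
  | zero => intro L hit _ _; rfl
  | succ r ih =>
      intro L hit hL hb
      have hlt : i + (L - 1) < words.length := by omega
      have hacc : K words i (L - 1) ++ (words.map normW).getD (i + L - 1) [] = K words i L := by
        rw [norm_getD words (i + L - 1) (by omega)]
        have e1 : i + L - 1 = i + (L - 1) := by omega
        rw [e1, ← K_succ words i (L - 1) hlt]
        congr 1
        omega
      simp only [bestGo', hacc]
      have e2 : L + 1 - 1 = L := by omega
      have := ih (L + 1) (if om.contains (K words i L) = true then some (L, K words i L) else hit)
        (by omega) (by omega)
      rw [e2] at this
      rw [this, G_shift]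
      cases hG : G om words i (L + 1) r with
      | some x => simp
      | none =>
          by_cases hc : om.contains (K words i L) = true
          · simp [hc]
          · simp only [Bool.not_eq_true] at hc; simp [hc]

-- A's inner scan also computes the topmost hit
theorem findA_range (om : PySem.Dict (List Char) String) (words : List (List Char)) (i : Nat) :
    ∀ r : Nat,
      ((List.range' (i + 1) r).foldl
        (fun st j =>
          let normalized :=
            PySem.Chars.lower (PySem.Chars.replace
              (PySem.Chars.join [' '] ((words.drop i).take (j - i))) [' '] [])
          if om.contains normalized then
            if j - i > st.1 then (j - i, some normalized) else st
          else st)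
        (0, none)) =
      (match G om words i 1 r with
       | some (L, k) => (L, some k)
       | none => (0, none)) := by
  intro r
  induction r with
  | zero => rfl
  | succ r ih =>
      rw [List.range'_1_concat, List.foldl_append, ih]
      have e1 : i + 1 + r - i = r + 1 := by omega
      have hGr : G om words i 1 (r + 1) =
          if om.contains (K words i (1 + r)) then some (1 + r, K words i (1 + r))
          else G om words i 1 r := rfl
      have e2 : 1 + r = r + 1 := by omega
      rw [hGr, e2]
      have hnorm : PySem.Chars.lower (PySem.Chars.replace
          (PySem.Chars.join [' '] ((words.drop i).take (r + 1))) [' '] []) = K words i (r + 1) := by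
        rw [normJ_eq]; rfl
      cases hG : G om words i 1 r with
      | none =>
          simp only [List.foldl_cons, List.foldl_nil, e1, hnorm]
          by_cases hc : om.contains (K words i (r + 1)) = true
          · simp [hc]
          · simp only [Bool.not_eq_true] at hc; simp [hc]
      | some x =>
          obtain ⟨L, k⟩ := x
          have hb := G_bound om words i r 1 L k hG
          simp only [List.foldl_cons, List.foldl_nil, e1, hnorm]
          by_cases hc : om.contains (K words i (r + 1)) = true
          · simp [hc, show r + 1 > L by omega]
          · simp only [Bool.not_eq_true] at hc; simp [hc]

-- the central per-position lemma: B's table entry vs A's inner scan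
theorem find_eq (om : PySem.Dict (List Char) String) (words : List (List Char)) (i : Nat)
    (hi : i < words.length) :
    bestGo om (buildPrefixes om) (words.map normW) i 1 (min 4 (words.length - i)) [] none =
      (match findA om words words.length i with
       | (len, some k) => some (len, k)
       | (_, none) => none) := by
  rw [bestGo_eq_bestGo']
  have hK0 : K words i 0 = [] := rfl
  have hB := bestGo'_spec om words i (min 4 (words.length - i)) 1 none (by omega) (by omega)
  rw [hK0] at hB
  rw [hB]
  unfold findA
  have e : min (i + 5) (words.length + 1) - (i + 1) = min 4 (words.length - i) := by omega
  rw [e, findA_range om words i (min 4 (words.length - i))]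
  cases G om words i 1 (min 4 (words.length - i)) with
  | none => rfl
  | some x => obtain ⟨L, k⟩ := x; rfl

-- recursive form of A's reconstruction pass
def recon (words : List (List Char)) : List (Nat × Nat) → Nat → List (List Char)
  | [], le => words.drop le
  | (s, e) :: rs, le => (words.drop le).take (s - le) ++ recon words rs e

theorem foldl_recon (words : List (List Char)) :
    ∀ (rs : List (Nat × Nat)) (acc : List (List Char)) (le : Nat),
      (rs.foldl
        (fun (st : List (List Char) × Nat) r => (st.1 ++ (words.drop st.2).take (r.1 - st.2), r.2))
        (acc, le)).1 ++
        words.drop (rs.foldl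
        (fun (st : List (List Char) × Nat) r => (st.1 ++ (words.drop st.2).take (r.1 - st.2), r.2))
        (acc, le)).2
      = acc ++ recon words rs le := by
  intro rs
  induction rs with
  | nil => intro acc le; simp [recon]
  | cons r rs ih =>
      intro acc le
      simp only [List.foldl_cons, recon]
      rw [ih]
      simp [List.append_assoc]

theorem loopA_head_ge (om : PySem.Dict (List Char) String) (words : List (List Char)) (n : Nat) :
    ∀ (fuel i s e : Nat) (rs : List (Nat × Nat)),
      (loopA om words n fuel i).1 = (s, e) :: rs → i ≤ s := by
  intro fuel
  induction fuel with
  | zero => intro i s e rs h; simp [loopA] at h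
  | succ fuel ih =>
      intro i s e rs h
      simp only [loopA] at h
      split at h
      · cases hf : (findA om words n i).2 with
        | some k => rw [hf] at h; simp at h; omega
        | none => rw [hf] at h; have := ih _ _ _ _ h; omega
      · simp at h

theorem recon_skip (words : List (List Char)) (i : Nat) (hi : i < words.length)
    (rs : List (Nat × Nat))
    (hhead : ∀ s e rs', rs = (s, e) :: rs' → i + 1 ≤ s) :
    recon words rs i = words.getD i [] :: recon words rs (i + 1) := by
  cases rs with
  | nil =>
      simp only [recon]
      rw [List.drop_eq_getElem_cons hi]
      simp [List.getD_eq_getElem?_getD, List.getElem?_eq_getElem hi]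
  | cons r rs' =>
      obtain ⟨s, e⟩ := r
      have hs : i + 1 ≤ s := hhead s e rs' rfl
      simp only [recon]
      have : s - i = (s - (i + 1)) + 1 := by omega
      rw [this, List.drop_eq_getElem_cons hi, List.take_succ_cons]
      simp [List.getD_eq_getElem?_getD, List.getElem?_eq_getElem hi]

theorem loop_eq (om : PySem.Dict (List Char) String) (words : List (List Char))
    (table : List (Option (Nat × List Char)))
    (htab : ∀ i, i < words.length → table.getD i none =
      (match findA om words words.length i with
       | (len, some k) => some (len, k)
       | (_, none) => none)) :
    ∀ (fuel i : Nat), words.length ≤ i + fuel →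
      (loopA om words words.length fuel i).2 = (loopB om table words words.length fuel i).1 ∧
      recon words (loopA om words words.length fuel i).1 i =
        (loopB om table words words.length fuel i).2 := by
  intro fuel
  induction fuel with
  | zero =>
      intro i hle
      refine ⟨rfl, ?_⟩
      simp only [loopA, recon]
      exact List.drop_eq_nil_of_le hle
  | succ fuel ih =>
      intro i hle
      by_cases hi : i < words.length
      · have hfind := htab i hi
        cases hA : findA om words words.length i with
        | mk len ok =>
          cases ok with
          | some k =>
              rw [hA] at hfind
              have hlen : 1 ≤ len := by
                have := findA_pos om words words.length i k
                rw [hA] at this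
                exact this rfl
              have hIH := ih (i + len) (by omega)
              simp only [loopA, loopB, hi, if_pos, hA, hfind]
              simp only [recon]
              simp only [Nat.sub_self, List.take_zero, List.nil_append]
              exact ⟨by rw [hIH.1], hIH.2⟩
          | none =>
              rw [hA] at hfind
              have hIH := ih (i + 1) (by omega)
              simp only [loopA, loopB, hi, if_pos, hA, hfind]
              refine ⟨hIH.1, ?_⟩
              rw [recon_skip words i hi _ (fun s e rs' h => loopA_head_ge om words _ fuel (i+1) s e rs' h)]
              rw [hIH.2]
      · refine ⟨?_, ?_⟩ <;> simp only [loopA, loopB, if_neg hi, recon]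
        exact List.drop_eq_nil_of_le (by omega)

-- ===== VERDICT (by name: the statement is the Claim_ definition above) =====
theorem clean_artists_spec : Claim_equal_clean_artists := by
  intro text target_artists _
  unfold Spec_clean_artists clean_artists clean_artists_alt
  set om := buildMap target_artists
  set words := PySem.Chars.split₀ text.toList
  have htab : ∀ i, i < words.length →
      ((List.range words.length).map
        (fun i => bestGo om (buildPrefixes om) (words.map normW) i 1 (min 4 (words.length - i)) [] none)).getD i none =
      (match findA om words words.length i with
       | (len, some k) => some (len, k)
       | (_, none) => none) := by
    intro i hi
    rw [List.getD_eq_getElem?_getD, List.getElem?_map, List.getElem?_range hi]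
    simpa using find_eq om words i hi
  have h := loop_eq om words _ htab words.length 0 (by omega)
  have hr := foldl_recon words (loopA om words words.length words.length 0).1 [] 0
  simp only [List.nil_append] at hr
  simp only [h.1]
  rw [hr, h.2]
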